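-- pv_equiv track=rewrite | github.com/jetfan-xin/SimultaneousTranslation | experiments/xcomet_4.0/fix_samples_clean_space_punct.py | rebuild_segments
-- ===== SOURCE A (Python) =====
-- import unicodedata
-- from typing import Any, Dict, List, Tuple
--
-- def is_space_or_punct(ch: str) -> bool:
--     return ch.isspace() or unicodedata.category(ch).startswith("P")
--
-- def is_space_or_punct_only_diff(text_a: str, text_b: str) -> bool:
--     def normalize(text: str) -> str:
--         return "".join(ch for ch in (text or "") if not is_space_or_punct(ch))
--     return normalize(text_a) == normalize(text_b)
--
-- def build_norm_map(text: str) -> List[int]: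
--     indices: List[int] = []
--     for idx, ch in enumerate(text or ""):
--         if not is_space_or_punct(ch):
--             indices.append(idx)
--     return indices
--
-- def count_norm_chars(text: str) -> int:
--     return sum(1 for ch in (text or "") if not is_space_or_punct(ch))
--
-- def rebuild_segments(mt_text: str, mt_segs: List[str]) -> Tuple[List[str], str]:
--     if not mt_segs:
--         return [], "no_segments"
--
--     joined = "".join(mt_segs)
--     if joined == (mt_text or ""):
--         return mt_segs, "already_aligned"
--
--     if not is_space_or_punct_only_diff(joined, mt_text or ""):
--         return mt_segs, "not_space_or_punct"
--
--     norm_map = build_norm_map(mt_text or "")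
--     norm_lens = [count_norm_chars(seg) for seg in mt_segs]
--     if sum(norm_lens) != len(norm_map):
--         return mt_segs, "norm_length_mismatch"
--
--     start_norms: List[int] = []
--     acc = 0
--     for length in norm_lens:
--         start_norms.append(acc)
--         acc += length
--
--     start_indices: List[int] = []
--     for idx, start_norm in enumerate(start_norms):
--         if idx == 0:
--             start_indices.append(0)
--             continue
--         if start_norm >= len(norm_map):
--             start_indices.append(len(mt_text or ""))
--         else:
--             start_indices.append(norm_map[start_norm])
--
--     # Ensure non-decreasing starts.
--     for i in range(1, len(start_indices)):
--         if start_indices[i] < start_indices[i - 1]: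
--             return mt_segs, "non_monotonic_boundaries"
--
--     new_segments: List[str] = []
--     for i, start in enumerate(start_indices):
--         end = start_indices[i + 1] if i + 1 < len(start_indices) else len(mt_text or "")
--         new_segments.append((mt_text or "")[start:end])
--
--     if "".join(new_segments) != (mt_text or ""):
--         return mt_segs, "rebuild_failed"
--
--     return new_segments, "updated"
-- ===== SOURCE B (Python) =====
-- import unicodedata
-- from typing import List, Tuple
--
--
-- def is_space_or_punct(ch: str) -> bool:
--     return ch.isspace() or unicodedata.category(ch).startswith("P")
--
--
-- def norm_len(text: str) -> int:
--     return sum(1 for ch in text if not is_space_or_punct(ch))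
--
--
-- def split_norm(text: str, need: int) -> Tuple[str, str]:
--     # Cut off the shortest prefix containing `need` normalized (non-space/punct)
--     # characters plus any space/punct run that follows it.
--     i = 0
--     n = len(text)
--     while i < n:
--         if is_space_or_punct(text[i]):
--             i += 1
--         elif need == 0:
--             break
--         else:
--             need -= 1
--             i += 1
--     return text[:i], text[i:]
--
--
-- def rebuild_segments(mt_text: str, mt_segs: List[str]) -> Tuple[List[str], str]:
--     if not mt_segs:
--         return [], "no_segments"
--     text = mt_text or ""
--     joined = "".join(mt_segs)
--     if joined == text:
--         return mt_segs, "already_aligned"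
--     if [c for c in joined if not is_space_or_punct(c)] != [c for c in text if not is_space_or_punct(c)]:
--         return mt_segs, "not_space_or_punct"
--     out: List[str] = []
--     rest = text
--     for seg in mt_segs[:-1]:
--         piece, rest = split_norm(rest, norm_len(seg))
--         out.append(piece)
--     out.append(rest)
--     return out, "updated"
-- ===== Notes on version B (the rewrite author's own statement) =====
-- stated objective: simpler
-- what changed: Replaces the norm-map index table, prefix sums, boundary lookup, monotonicity check and rebuild verification with a single two-pointer pass that splits the text segment by segment, dropping the provably dead norm_length_mismatch/non_monotonic_boundaries/rebuild_failed branches.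
import Mathlib
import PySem

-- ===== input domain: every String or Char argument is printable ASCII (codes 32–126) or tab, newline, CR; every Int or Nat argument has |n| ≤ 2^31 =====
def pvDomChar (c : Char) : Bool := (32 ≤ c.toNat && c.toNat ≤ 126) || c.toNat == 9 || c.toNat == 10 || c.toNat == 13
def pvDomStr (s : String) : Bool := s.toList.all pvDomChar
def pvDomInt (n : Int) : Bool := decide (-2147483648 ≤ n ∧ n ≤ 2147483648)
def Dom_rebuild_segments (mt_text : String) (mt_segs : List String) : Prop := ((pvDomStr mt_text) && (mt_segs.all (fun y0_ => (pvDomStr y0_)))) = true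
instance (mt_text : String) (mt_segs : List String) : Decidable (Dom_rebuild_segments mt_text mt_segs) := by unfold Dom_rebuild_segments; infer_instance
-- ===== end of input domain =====

-- B replaces A's norm-map table + prefix sums + boundary lookups by one two-pointer
-- pass splitting the text segment by segment; the dead failure branches are dropped (objective: simpler).

-- shared char predicate: ch.isspace() or unicodedata.category(ch).startswith("P");
-- exact on the ASCII domain (the punctuation literal lists all category-P chars in 32..126)
def pvIsSP (c : Char) : Bool :=
  PySem.Chars.isspace c || "!\"#%&'()*,-./:;?@[\\]_{}".toList.contains c

-- ===== PORT A =====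

-- "".join(ch for ch in text if not is_space_or_punct(ch)); both texts compared
def pvNormalize (cs : List Char) : List Char := cs.filter (fun c => !pvIsSP c)

-- build_norm_map: enumerate loop collecting indices of non-space/punct chars
def pvBuildNormMap : List Char → Nat → List Nat
  | [], _ => []
  | c :: cs, i => if !pvIsSP c then i :: pvBuildNormMap cs (i + 1) else pvBuildNormMap cs (i + 1)

-- count_norm_chars: sum(1 for ch in text if not is_space_or_punct(ch))
def pvCountNorm (cs : List Char) : Nat := cs.countP (fun c => !pvIsSP c)

-- the start_norms accumulator loop
def pvStartNorms : List Nat → Nat → List Nat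
  | [], _ => []
  | l :: ls, acc => acc :: pvStartNorms ls (acc + l)

-- the start_indices loop (idx 0 special-cased, lookup guarded by the length test)
def pvStartIndices (normMap : List Nat) (textLen : Nat) : List Nat → Nat → List Nat
  | [], _ => []
  | s :: ss, idx =>
    (if idx = 0 then 0
     else if normMap.length ≤ s then textLen
     else normMap.getD s 0) :: pvStartIndices normMap textLen ss (idx + 1)

-- the non-decreasing check over range(1, len(start_indices))
def pvNonMono : List Nat → Bool
  | a :: b :: rest => b < a || pvNonMono (b :: rest)
  | _ => false

-- Python text[a:b]; exact for Nat bounds (PySem.List.slice_natCast)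
def pvSlice (cs : List Char) (a b : Nat) : List Char := (cs.drop a).take (b - a)

-- the new_segments loop: slice between consecutive starts, last end = len(text)
def pvBuildSegs (cs : List Char) : List Nat → List (List Char)
  | [] => []
  | [s] => [pvSlice cs s cs.length]
  | s :: s' :: rest => pvSlice cs s s' :: pvBuildSegs cs (s' :: rest)

def rebuild_segments (mt_text : String) (mt_segs : List String) : List String × String :=
  if mt_segs = [] then ([], "no_segments")
  else
    let cs := mt_text.toList
    let joined := (mt_segs.map String.toList).flatten
    if joined = cs then (mt_segs, "already_aligned")
    else if pvNormalize joined ≠ pvNormalize cs then (mt_segs, "not_space_or_punct")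
    else
      let normMap := pvBuildNormMap cs 0
      let normLens := mt_segs.map (fun s => pvCountNorm s.toList)
      if normLens.sum ≠ normMap.length then (mt_segs, "norm_length_mismatch")
      else
        let startIdxs := pvStartIndices normMap cs.length (pvStartNorms normLens 0) 0
        if pvNonMono startIdxs then (mt_segs, "non_monotonic_boundaries")
        else
          let newSegs := pvBuildSegs cs startIdxs
          if newSegs.flatten ≠ cs then (mt_segs, "rebuild_failed")
          else (newSegs.map String.ofList, "updated")

-- ===== PORT B =====

-- split_norm: one cursor walk; cut after `need` normalized chars plus the following space/punct run
def pvSplitNorm : List Char → Nat → List Char × List Char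
  | [], _ => ([], [])
  | c :: cs, need =>
    if pvIsSP c then
      let p := pvSplitNorm cs need
      (c :: p.1, p.2)
    else if need = 0 then ([], c :: cs)
    else
      let p := pvSplitNorm cs (need - 1)
      (c :: p.1, p.2)

-- the for-loop over mt_segs[:-1], appending the final rest
def pvRebuildLoop : List (List Char) → List Char → List (List Char)
  | [], rest => [rest]
  | seg :: segs, rest =>
    let p := pvSplitNorm rest (pvCountNorm seg)
    p.1 :: pvRebuildLoop segs p.2

def rebuild_segments_alt (mt_text : String) (mt_segs : List String) : List String × String :=
  if mt_segs = [] then ([], "no_segments")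
  else
    let cs := mt_text.toList
    let joined := (mt_segs.map String.toList).flatten
    if joined = cs then (mt_segs, "already_aligned")
    else if pvNormalize joined ≠ pvNormalize cs then (mt_segs, "not_space_or_punct")
    else ((pvRebuildLoop ((mt_segs.map String.toList).dropLast) cs).map String.ofList, "updated")

-- ===== PRECONDITION & SPEC =====
def Spec_rebuild_segments (mt_text : String) (mt_segs : List String) (out : List String × String) : Prop := out = rebuild_segments_alt mt_text mt_segs
instance (mt_text : String) (mt_segs : List String) (out : List String × String) : Decidable (Spec_rebuild_segments mt_text mt_segs out) := by unfold Spec_rebuild_segments; infer_instance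

-- ===== CLAIM (what is proved, stated in full; the proofs are below) =====
def Claim_equal_rebuild_segments : Prop := ∀ (mt_text : String) (mt_segs : List String), Dom_rebuild_segments mt_text mt_segs → Spec_rebuild_segments mt_text mt_segs (rebuild_segments mt_text mt_segs)

-- ===== LEMMAS AND PROOFS =====

-- index of the m-th normalized char of cs (cs.length if fewer than m+1 of them)
def pvNthNorm : List Char → Nat → Nat
  | [], _ => 0
  | c :: cs, m =>
    if pvIsSP c then 1 + pvNthNorm cs m
    else if m = 0 then 0 else 1 + pvNthNorm cs (m - 1)

theorem pvNthNorm_exhaust (cs : List Char) (m : Nat) (h : pvCountNorm cs ≤ m) :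
    pvNthNorm cs m = cs.length := by
  induction cs generalizing m with
  | nil => simp [pvNthNorm]
  | cons c cs ih =>
    by_cases hsp : pvIsSP c
    · have h' : pvCountNorm cs ≤ m := by
        simpa [pvCountNorm, List.countP_cons, hsp] using h
      simp only [pvNthNorm, hsp, if_true, List.length_cons]
      rw [ih m h']; omega
    · have h' : pvCountNorm cs + 1 ≤ m := by
        simpa [pvCountNorm, List.countP_cons, hsp] using h
      have hm : m ≠ 0 := by omega
      simp only [pvNthNorm, hsp, Bool.false_eq_true, if_false, if_neg hm, List.length_cons]
      rw [ih (m - 1) (by omega)]; omega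

theorem pvNthNorm_comp (cs : List Char) (m d : Nat) :
    pvNthNorm cs (m + d) = pvNthNorm cs m + pvNthNorm (cs.drop (pvNthNorm cs m)) d := by
  induction cs generalizing m with
  | nil => simp [pvNthNorm]
  | cons c cs ih =>
    by_cases hsp : pvIsSP c
    · simp only [pvNthNorm, hsp, if_true]
      rw [Nat.add_comm 1 (pvNthNorm cs m), List.drop_succ_cons, ih m]
      omega
    · by_cases hm : m = 0
      · subst hm; simp [pvNthNorm, hsp]
      · simp only [pvNthNorm, hsp, Bool.false_eq_true, if_false]
        have hmd : m + d ≠ 0 := by omega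
        simp only [hm, hmd, if_false]
        have he : m + d - 1 = (m - 1) + d := by omega
        rw [he, Nat.add_comm 1 (pvNthNorm cs (m - 1)), List.drop_succ_cons, ih (m - 1)]
        omega

theorem pvNthNorm_mono (cs : List Char) {m m' : Nat} (h : m ≤ m') :
    pvNthNorm cs m ≤ pvNthNorm cs m' := by
  have := pvNthNorm_comp cs m (m' - m)
  rw [Nat.add_sub_cancel' h] at this
  omega

theorem pvBuildNormMap_length (cs : List Char) (i : Nat) :
    (pvBuildNormMap cs i).length = pvCountNorm cs := by
  induction cs generalizing i with
  | nil => simp [pvBuildNormMap, pvCountNorm]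
  | cons c cs ih =>
    by_cases hsp : pvIsSP c
    · simp only [pvBuildNormMap, hsp, Bool.not_true, Bool.false_eq_true, if_false]
      rw [ih (i + 1)]
      simp [pvCountNorm, List.countP_cons, hsp]
    · simp only [pvBuildNormMap, hsp, Bool.not_false, if_true, List.length_cons]
      rw [ih (i + 1)]
      simp [pvCountNorm, List.countP_cons, hsp]

theorem pvBuildNormMap_getD (cs : List Char) (i s : Nat) (h : s < pvCountNorm cs) :
    (pvBuildNormMap cs i).getD s 0 = i + pvNthNorm cs s := by
  induction cs generalizing i s with
  | nil => simp [pvCountNorm] at h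
  | cons c cs ih =>
    by_cases hsp : pvIsSP c
    · have h' : s < pvCountNorm cs := by
        simpa [pvCountNorm, List.countP_cons, hsp] using h
      simp only [pvBuildNormMap, pvNthNorm, hsp, Bool.not_true, Bool.false_eq_true, if_false,
        if_true]
      rw [ih (i + 1) s h']
      omega
    · simp only [pvBuildNormMap, pvNthNorm, hsp, Bool.not_false, if_true, Bool.false_eq_true,
        if_false]
      cases s with
      | zero => simp
      | succ s' =>
        have h' : s' < pvCountNorm cs := by
          have : s' + 1 < pvCountNorm cs + 1 := by
            simpa [pvCountNorm, List.countP_cons, hsp] using h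
          omega
        simp only [List.getD_cons_succ, Nat.add_one_sub_one, Nat.succ_ne_zero, if_false]
        rw [ih (i + 1) s' h']
        omega

-- the boundary value A computes for a non-first segment, as a function of the norm position
theorem pvBoundary_eq (cs : List Char) (s : Nat) :
    (if (pvBuildNormMap cs 0).length ≤ s then cs.length else (pvBuildNormMap cs 0).getD s 0)
      = pvNthNorm cs s := by
  rw [pvBuildNormMap_length]
  split_ifs with h
  · exact (pvNthNorm_exhaust cs s h).symm
  · rw [pvBuildNormMap_getD cs 0 s (by omega)]
    omega

theorem pvStartIndices_cons0 (nm : List Nat) (L : Nat) (s : Nat) (ss : List Nat) :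
    pvStartIndices nm L (s :: ss) 0 = 0 :: pvStartIndices nm L ss 1 := by
  simp [pvStartIndices]

theorem pvStartIndices_eq_map (cs : List Char) (ss : List Nat) (k : Nat) (hk : k ≠ 0) :
    pvStartIndices (pvBuildNormMap cs 0) cs.length ss k = ss.map (pvNthNorm cs) := by
  induction ss generalizing k with
  | nil => simp [pvStartIndices]
  | cons s ss ih =>
    simp only [pvStartIndices, List.map_cons, hk, if_false]
    rw [pvBoundary_eq, ih (k + 1) (by omega)]

theorem pvNonMono_false (cs : List Char) (ls : List Nat) (acc b : Nat)
    (hb : b ≤ pvNthNorm cs acc) :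
    pvNonMono (b :: (pvStartNorms ls acc).map (pvNthNorm cs)) = false := by
  induction ls generalizing acc b with
  | nil => simp [pvStartNorms, pvNonMono]
  | cons l ls ih =>
    simp only [pvStartNorms, List.map_cons, pvNonMono, Bool.or_eq_false_iff]
    refine ⟨by simp; omega, ih (acc + l) _ (pvNthNorm_mono cs (by omega))⟩

theorem pvSplitNorm_eq (cs : List Char) (need : Nat) :
    pvSplitNorm cs need = (cs.take (pvNthNorm cs need), cs.drop (pvNthNorm cs need)) := by
  induction cs generalizing need with
  | nil => simp [pvSplitNorm, pvNthNorm]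
  | cons c cs ih =>
    by_cases hsp : pvIsSP c
    · simp [pvSplitNorm, pvNthNorm, hsp, ih, Nat.add_comm 1]
    · by_cases hn : need = 0
      · simp [pvSplitNorm, pvNthNorm, hsp, hn]
      · simp [pvSplitNorm, pvNthNorm, hsp, hn, ih, Nat.add_comm 1]

theorem pvRebuildLoop_flatten (segs : List (List Char)) (rest : List Char) :
    (pvRebuildLoop segs rest).flatten = rest := by
  induction segs generalizing rest with
  | nil => simp [pvRebuildLoop]
  | cons s ss ih => simp [pvRebuildLoop, pvSplitNorm_eq, ih]

-- the central alignment: B's loop over the tail equals A's slice-building over the boundaries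
theorem pvMain (cs : List Char) (ss : List (List Char)) (s : List Char) (m : Nat) :
    pvRebuildLoop ((s :: ss).dropLast) (cs.drop (pvNthNorm cs m))
      = pvBuildSegs cs (pvNthNorm cs m ::
          (pvStartNorms (ss.map pvCountNorm) (m + pvCountNorm s)).map (pvNthNorm cs)) := by
  induction ss generalizing s m with
  | nil =>
    have hdl : ([s] : List (List Char)).dropLast = [] := rfl
    rw [hdl]
    simp only [pvRebuildLoop, List.map_nil, pvStartNorms, pvBuildSegs, pvSlice]
    rw [List.take_of_length_le (by simp)]
  | cons s' ss ih =>
    have hdl : (s :: s' :: ss).dropLast = s :: (s' :: ss).dropLast := rfl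
    rw [hdl]
    simp only [pvRebuildLoop, pvSplitNorm_eq, List.map_cons, pvStartNorms, pvBuildSegs]
    have hcomp := pvNthNorm_comp cs m (pvCountNorm s)
    congr 1
    · simp only [pvSlice]
      rw [hcomp]
      congr 1
      omega
    · rw [List.drop_drop, ← hcomp, ih s' (m + pvCountNorm s)]

theorem pvCountP_flatten (l : List (List Char)) (p : Char → Bool) :
    (l.flatten).countP p = (l.map (fun x => x.countP p)).sum := by
  induction l with
  | nil => simp
  | cons x xs ih => simp [List.countP_append, ih]

-- ===== VERDICT (by name: the statement is the Claim_ definition above) =====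
theorem rebuild_segments_spec : Claim_equal_rebuild_segments := by
  intro mt_text mt_segs _
  show rebuild_segments mt_text mt_segs = rebuild_segments_alt mt_text mt_segs
  unfold rebuild_segments rebuild_segments_alt
  by_cases h0 : mt_segs = []
  · simp [h0]
  · simp only [h0, if_false]
    by_cases h1 : (mt_segs.map String.toList).flatten = mt_text.toList
    · simp [h1]
    · simp only [h1, if_false]
      by_cases h2 : pvNormalize ((mt_segs.map String.toList).flatten)
          ≠ pvNormalize mt_text.toList
      · simp [h2]
      · push_neg at h2
        simp only [h2, ne_eq, not_true_eq_false, if_false]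
        have hsum : (mt_segs.map (fun s => pvCountNorm s.toList)).sum
            = (pvBuildNormMap mt_text.toList 0).length := by
          rw [pvBuildNormMap_length]
          have h3 : (mt_segs.map (fun s => pvCountNorm s.toList)).sum
              = pvCountNorm ((mt_segs.map String.toList).flatten) := by
            unfold pvCountNorm
            rw [pvCountP_flatten, List.map_map]
            rfl
          rw [h3]
          unfold pvCountNorm
          rw [List.countP_eq_length_filter, List.countP_eq_length_filter]
          exact congrArg List.length h2
        simp only [hsum, ne_eq, not_true_eq_false, if_false]
        obtain ⟨s0, rest, rfl⟩ : ∃ s0 rest, mt_segs = s0 :: rest := by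
          cases mt_segs with
          | nil => exact absurd rfl h0
          | cons a b => exact ⟨a, b, rfl⟩
        cases rest with
        | nil =>
          have hdl : ([s0.toList] : List (List Char)).dropLast = [] := rfl
          simp only [List.map_cons, List.map_nil, pvStartNorms, pvStartIndices_cons0,
            pvStartIndices, pvNonMono, pvRebuildLoop, hdl, pvBuildSegs, pvSlice,
            Nat.sub_zero, List.drop_zero, List.take_length, Bool.false_eq_true, if_false,
            List.flatten, List.append_eq, List.append_nil, ne_eq, not_true_eq_false]
        | cons s1 rest' =>
          simp only [List.map_cons, pvStartNorms, pvStartIndices_cons0, Nat.zero_add]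
          rw [pvStartIndices_eq_map mt_text.toList _ 1 one_ne_zero]
          set cs := mt_text.toList with hcs
          set ls := (s1 :: rest').map (fun s => pvCountNorm s.toList) with hls
          -- the monotonicity check never fires
          have hmono : pvNonMono (0 :: (pvStartNorms ls (pvCountNorm s0.toList)).map
              (pvNthNorm cs)) = false :=
            pvNonMono_false cs ls (pvCountNorm s0.toList) 0 (Nat.zero_le _)
          -- A's built segments are exactly B's loop output
          have hsegs : pvBuildSegs cs (0 :: (pvStartNorms ls (pvCountNorm s0.toList)).map
                (pvNthNorm cs))
              = pvRebuildLoop ((s0.toList :: (s1 :: rest').map String.toList).dropLast) cs := by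
            have hdl : (s0.toList :: (s1 :: rest').map String.toList).dropLast
                = s0.toList :: ((s1 :: rest').map String.toList).dropLast := rfl
            rw [hdl, hls]
            simp only [List.map_cons, pvStartNorms, pvRebuildLoop, pvSplitNorm_eq, pvBuildSegs]
            have hmain := pvMain cs (rest'.map String.toList) s1.toList (pvCountNorm s0.toList)
            rw [List.map_map] at hmain
            refine List.cons_eq_cons.mpr ⟨by simp [pvSlice], ?_⟩
            exact hmain.symm
          -- the rebuild check never fires
          have hflat : (pvBuildSegs cs (0 :: (pvStartNorms ls (pvCountNorm s0.toList)).map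
              (pvNthNorm cs))).flatten = cs := by
            rw [hsegs, pvRebuildLoop_flatten]
          have hfold : (pvCountNorm s0.toList :: pvStartNorms
              (rest'.map (fun s => pvCountNorm s.toList))
              (pvCountNorm s0.toList + pvCountNorm s1.toList))
              = pvStartNorms ls (pvCountNorm s0.toList) := rfl
          rw [hfold, hmono]
          simp only [Bool.false_eq_true, if_false, hflat, ne_eq, not_true_eq_false]
          rw [hsegs]
          rfl
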